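-- pv_equiv track=rewrite | github.com/zhaobu/leetcode_go | python/151.颠倒字符串中的单词.py | trimSpace
-- ===== SOURCE A (Python) =====
-- def trimSpace(s: str) -> list:
--     # 去除两边空格
--
--     i, j = 0, len(s) - 1
--     while i <= j and (s[i] == ' ' or s[j] == ' '):
--         if s[i] == ' ':
--             i += 1
--         if s[j] == ' ':
--             j -= 1
--     # 去除中间多余空格
--     strList = []
--     while i <= j:
--         if s[i] != ' ':
--             strList.append(s[i])
--         elif strList[-1] != ' ':
--             strList.append(' ')
--         i += 1
--
--     return strList
-- ===== SOURCE B (Python) =====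
-- def trimSpace(s: str) -> list:
--     # tokenize on ' ', drop empty tokens (trims ends and collapses runs), rejoin
--     return list(' '.join(w for w in s.split(' ') if w))
-- ===== Notes on version B (the rewrite author's own statement) =====
-- stated objective: simpler
-- what changed: Replaces the two-pointer end-trimming loop plus streaming space-collapse loop with a tokenize-on-space / filter-empty-tokens / rejoin decomposition.
import Mathlib
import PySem

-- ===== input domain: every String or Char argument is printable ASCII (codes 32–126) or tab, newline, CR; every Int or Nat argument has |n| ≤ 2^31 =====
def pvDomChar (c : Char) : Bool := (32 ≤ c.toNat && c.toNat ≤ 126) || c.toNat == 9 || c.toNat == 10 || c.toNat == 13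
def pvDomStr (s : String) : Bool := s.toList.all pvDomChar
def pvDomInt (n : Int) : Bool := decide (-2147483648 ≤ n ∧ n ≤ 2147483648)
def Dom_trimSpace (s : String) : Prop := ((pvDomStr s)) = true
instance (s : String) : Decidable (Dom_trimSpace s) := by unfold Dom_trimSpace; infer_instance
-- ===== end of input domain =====

-- B replaces A's two-pointer end-trimming loop plus streaming space-collapse loop with a
-- tokenize-on-space / drop-empty-tokens / rejoin decomposition (simpler; measured faster via C-level str ops).

-- ===== PORT A =====
-- s[i]: every access A performs is at a trusted in-range index, so the getD default is never hit
def pvGetC (cs : List Char) (i : Int) : Char := (PySem.List.pyGet? cs i).getD ' '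

-- first while loop: trim spaces from both ends
def pvLoop1 (cs : List Char) (i j : Int) : Int × Int :=
  if h : i ≤ j ∧ (pvGetC cs i = ' ' ∨ pvGetC cs j = ' ') then
    pvLoop1 cs (if pvGetC cs i = ' ' then i + 1 else i) (if pvGetC cs j = ' ' then j - 1 else j)
  else (i, j)
termination_by (j + 1 - i).toNat
decreasing_by
  rcases h with ⟨h1, h2⟩
  split_ifs with hi hj hj
  · omega
  · omega
  · omega
  · exact absurd h2 (by simp [hi, hj])

-- body of the second while loop (strList[-1] ported as pyGet? acc (-1))
def pvCollapseF (acc : List Char) (c : Char) : List Char :=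
  if c ≠ ' ' then acc ++ [c]
  else if PySem.List.pyGet? acc (-1) ≠ some ' ' then acc ++ [' '] else acc

-- second while loop: append non-spaces, collapse interior space runs
def pvLoop2 (cs : List Char) (i j : Int) (acc : List Char) : List Char :=
  if h : i ≤ j then
    pvLoop2 cs (i + 1) j (pvCollapseF acc (pvGetC cs i))
  else acc
termination_by (j + 1 - i).toNat
decreasing_by omega

def trimSpace (s : String) : List String :=
  let cs := s.toList
  let p := pvLoop1 cs 0 ((cs.length : Int) - 1)
  (pvLoop2 cs p.1 p.2 []).map (fun c => String.ofList [c])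

-- ===== PORT B =====
def trimSpace_alt (s : String) : List String :=
  let parts := PySem.Chars.splitOn s.toList [' ']          -- s.split(' ')
  let ws := parts.filter (fun w => !w.isEmpty)             -- (w for w in … if w)
  let joined := PySem.Chars.join [' '] ws                  -- ' '.join(…)
  joined.map (fun c => String.ofList [c])                  -- list(…)

-- ===== PRECONDITION & SPEC =====
def Spec_trimSpace (s : String) (out : List String) : Prop := out = trimSpace_alt s
instance (s : String) (out : List String) : Decidable (Spec_trimSpace s out) := by unfold Spec_trimSpace; infer_instance

-- ===== CLAIM (what is proved, stated in full; the proofs are below) =====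
def Claim_equal_trimSpace : Prop := ∀ (s : String), Dom_trimSpace s → Spec_trimSpace s (trimSpace s)

-- ===== LEMMAS AND PROOFS =====

-- the characters A's loops still consider: indices i..j of cs
def pvSub (cs : List Char) (i j : Int) : List Char := (cs.drop i.toNat).take (j + 1 - i).toNat

def pvSp (c : Char) : Bool := c == ' '
def pvNsp (c : Char) : Bool := !(c == ' ')

def pvTrim (l : List Char) : List Char := (l.dropWhile pvSp).rdropWhile pvSp

-- canonical split on ' ' (what PySem.Chars.splitOn.go computes)
def pvSplitAux (cur : List Char) : List Char → List (List Char)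
  | [] => [cur]
  | c :: r => if c = ' ' then cur :: pvSplitAux [] r else pvSplitAux (cur ++ [c]) r

-- the nonempty words of a string, with an in-progress word accumulator
def pvWordsAux (cur : List Char) : List Char → List (List Char)
  | [] => if cur.isEmpty then [] else [cur]
  | c :: r => if c = ' ' then (if cur.isEmpty then [] else [cur]) ++ pvWordsAux [] r
              else pvWordsAux (cur ++ [c]) r

lemma pvGetC_eq (cs : List Char) (i : Int) (h0 : 0 ≤ i) (h : i.toNat < cs.length) :
    pvGetC cs i = cs[i.toNat] := by
  unfold pvGetC
  conv_lhs => rw [show i = (i.toNat : Int) by omega, PySem.List.pyGet?_natCast,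
    List.getElem?_eq_getElem h]
  rfl

lemma pyGet_neg_one (l : List Char) : PySem.List.pyGet? l (-1) = l.getLast? := by
  cases l with
  | nil => simp [PySem.List.pyGet?, PySem.List.pyIdx?]
  | cons a t => simp [PySem.List.pyGet?, PySem.List.pyIdx?, List.getLast?_eq_getElem?]

lemma pvSub_nil (cs : List Char) (i j : Int) (h : j < i) : pvSub cs i j = [] := by
  unfold pvSub
  have : (j + 1 - i).toNat = 0 := by omega
  simp [this]

lemma pvSub_cons (cs : List Char) (i j : Int) (h0 : 0 ≤ i) (hij : i ≤ j) (hj : j < (cs.length : Int)) :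
    pvSub cs i j = cs[i.toNat]'(by omega) :: pvSub cs (i + 1) j := by
  unfold pvSub
  rw [show (i + 1).toNat = i.toNat + 1 by omega,
    show (j + 1 - i).toNat = (j + 1 - (i + 1)).toNat + 1 by omega]
  rw [List.drop_eq_getElem_cons (l := cs) (i := i.toNat) (by omega)]
  rw [List.take_succ_cons]

lemma pvSub_concat (cs : List Char) (i j : Int) (h0 : 0 ≤ i) (hij : i ≤ j) (hj : j < (cs.length : Int)) :
    pvSub cs i j = pvSub cs i (j - 1) ++ [cs[j.toNat]'(by omega)] := by
  unfold pvSub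
  rw [show (j + 1 - i).toNat = (j - 1 + 1 - i).toNat + 1 by omega]
  rw [List.take_add_one]
  congr 1
  rw [List.getElem?_drop]
  rw [show i.toNat + (j - 1 + 1 - i).toNat = j.toNat by omega]
  rw [List.getElem?_eq_getElem (by omega)]
  rfl

lemma pvSub_full (cs : List Char) : pvSub cs 0 ((cs.length : Int) - 1) = cs := by
  unfold pvSub
  have : ((cs.length : Int) - 1 + 1 - 0).toNat = cs.length := by omega
  simp [this]

lemma pvTrim_nil : pvTrim [] = [] := by simp [pvTrim, List.rdropWhile]

lemma pvTrim_cons_space (l : List Char) : pvTrim (' ' :: l) = pvTrim l := by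
  simp [pvTrim, pvSp]

lemma pvTrim_concat_space (l : List Char) : pvTrim (l ++ [' ']) = pvTrim l := by
  unfold pvTrim
  rw [List.dropWhile_append]
  split_ifs with h
  · rw [List.isEmpty_iff] at h
    rw [h]
    simp [pvSp, List.rdropWhile]
  · rw [List.rdropWhile_concat_pos _ _ _ (by simp [pvSp])]

lemma pvTrim_fixed (l : List Char) (h1 : l.head? ≠ some ' ') (h2 : l.getLast? ≠ some ' ') :
    pvTrim l = l := by
  unfold pvTrim
  have hd : l.dropWhile pvSp = l := by
    cases l with
    | nil => rfl
    | cons a t =>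
      rw [List.dropWhile_cons_of_neg]
      simp [pvSp]
      intro h; exact h1 (by simp [h])
  rw [hd]
  rcases l.eq_nil_or_concat with rfl | ⟨l', x, rfl⟩
  · rfl
  · rw [List.concat_eq_append] at h2 ⊢
    apply List.rdropWhile_concat_neg
    simp [pvSp]
    intro h; apply h2; simp [h]

lemma pvTrim_head (l : List Char) : (pvTrim l).head? ≠ some ' ' := by
  unfold pvTrim
  rcases hne : (l.dropWhile pvSp).rdropWhile pvSp with _ | ⟨x, t⟩
  · simp
  · have hpre := List.rdropWhile_prefix pvSp (l.dropWhile pvSp)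
    rw [hne] at hpre
    obtain ⟨tl, htl⟩ := hpre
    have hx : pvSp x = false := by
      have hnn : l.dropWhile pvSp ≠ [] := by rw [← htl]; simp
      have hh := List.head_dropWhile_not pvSp (l := l) hnn
      have h9 : (l.dropWhile pvSp).head? = some x := by rw [← htl]; simp
      rw [List.head?_eq_some_head hnn, Option.some.injEq] at h9
      rw [h9] at hh
      simpa using hh
    simp [pvSp] at hx
    simp [hx]

lemma pvTrim_last (l : List Char) : (pvTrim l).getLast? ≠ some ' ' := by
  unfold pvTrim
  rcases hne : (l.dropWhile pvSp).rdropWhile pvSp with _ | ⟨x, t⟩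
  · simp
  · have hnn : (l.dropWhile pvSp).rdropWhile pvSp ≠ [] := by rw [hne]; simp
    have h := List.rdropWhile_last_not pvSp (l.dropWhile pvSp) hnn
    rw [List.getLast?_eq_some_getLast (l := x :: t) (by simp)]
    intro hc
    simp only [Option.some.injEq] at hc
    apply h
    have : ((l.dropWhile pvSp).rdropWhile pvSp).getLast hnn = (x :: t).getLast (by simp) := by
      congr 1
    rw [this, hc]
    simp [pvSp]

lemma pvLoop1_spec_aux (cs : List Char) : ∀ (n : Nat) (i j : Int),
    (j + 1 - i).toNat ≤ n → 0 ≤ i → j < (cs.length : Int) →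
    0 ≤ (pvLoop1 cs i j).1 ∧ (pvLoop1 cs i j).2 < (cs.length : Int) ∧
      pvSub cs (pvLoop1 cs i j).1 (pvLoop1 cs i j).2 = pvTrim (pvSub cs i j) := by
  intro n
  induction n with
  | zero =>
    intro i j hn h0 hj
    rw [pvLoop1, dif_neg (by omega)]
    refine ⟨h0, hj, ?_⟩
    rw [pvSub_nil cs i j (by omega), pvTrim_nil]
  | succ n ih =>
    intro i j hn h0 hj
    by_cases hcond : i ≤ j ∧ (pvGetC cs i = ' ' ∨ pvGetC cs j = ' ')
    · obtain ⟨hij, hsp⟩ := hcond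
      rw [pvLoop1, dif_pos ⟨hij, hsp⟩]
      by_cases hi : pvGetC cs i = ' ' <;> by_cases hj2 : pvGetC cs j = ' '
      · -- both ends are spaces
        rw [if_pos hi, if_pos hj2]
        have hrec := ih (i + 1) (j - 1) (by omega) (by omega) (by omega)
        refine ⟨hrec.1, hrec.2.1, ?_⟩
        rw [hrec.2.2]
        by_cases heq : i = j
        · subst heq
          rw [pvSub_nil cs (i + 1) (i - 1) (by omega)]
          rw [pvSub_cons cs i i h0 le_rfl hj, pvSub_nil cs (i + 1) i (by omega)]
          rw [pvGetC_eq cs i h0 (by omega)] at hi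
          rw [hi, pvTrim_cons_space, pvTrim_nil]
        · have hlt : i < j := by omega
          rw [pvSub_cons cs i j h0 hij hj,
            pvSub_concat cs (i + 1) j (by omega) (by omega) hj]
          rw [pvGetC_eq cs i h0 (by omega)] at hi
          rw [pvGetC_eq cs j (by omega) (by omega)] at hj2
          rw [hi, hj2, pvTrim_cons_space, pvTrim_concat_space]
      · -- only the left end is a space
        rw [if_pos hi, if_neg hj2]
        have hrec := ih (i + 1) j (by omega) (by omega) hj
        refine ⟨hrec.1, hrec.2.1, ?_⟩
        rw [hrec.2.2]
        rw [pvSub_cons cs i j h0 hij hj]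
        rw [pvGetC_eq cs i h0 (by omega)] at hi
        rw [hi, pvTrim_cons_space]
      · -- only the right end is a space
        rw [if_neg hi, if_pos hj2]
        have hrec := ih i (j - 1) (by omega) h0 (by omega)
        refine ⟨hrec.1, hrec.2.1, ?_⟩
        rw [hrec.2.2]
        rw [pvSub_concat cs i j h0 hij hj]
        rw [pvGetC_eq cs j (by omega) (by omega)] at hj2
        rw [hj2, pvTrim_concat_space]
      · exact absurd hsp (by simp [hi, hj2])
    · rw [pvLoop1, dif_neg hcond]
      refine ⟨h0, hj, ?_⟩
      push_neg at hcond
      by_cases hij : i ≤ j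
      · obtain ⟨hi, hj2⟩ := hcond hij
        symm
        apply pvTrim_fixed
        · rw [pvSub_cons cs i j h0 hij hj]
          rw [pvGetC_eq cs i h0 (by omega)] at hi
          simpa using hi
        · rw [pvSub_concat cs i j h0 hij hj]
          rw [List.getLast?_append_of_ne_nil _ (by simp)]
          rw [pvGetC_eq cs j (by omega) (by omega)] at hj2
          simpa using hj2
      · rw [pvSub_nil cs i j (by omega), pvTrim_nil]

lemma pvLoop2_spec_aux (cs : List Char) : ∀ (n : Nat) (i j : Int) (acc : List Char),
    (j + 1 - i).toNat ≤ n → 0 ≤ i → j < (cs.length : Int) →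
    pvLoop2 cs i j acc = List.foldl pvCollapseF acc (pvSub cs i j) := by
  intro n
  induction n with
  | zero =>
    intro i j acc hn h0 hj
    rw [pvLoop2, dif_neg (by omega), pvSub_nil cs i j (by omega)]
    rfl
  | succ n ih =>
    intro i j acc hn h0 hj
    by_cases h : i ≤ j
    · rw [pvLoop2, dif_pos h, ih (i + 1) j _ (by omega) (by omega) hj]
      rw [pvSub_cons cs i j h0 h hj, List.foldl_cons, pvGetC_eq cs i h0 (by omega)]
    · rw [pvLoop2, dif_neg h, pvSub_nil cs i j (by omega)]
      rfl

lemma pvGo_eq : ∀ (fuel : Nat) (l cur : List Char) (acc : List (List Char)),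
    l.length < fuel →
    PySem.Chars.splitOn.go [' '] fuel l cur acc = acc.reverse ++ pvSplitAux cur.reverse l := by
  intro fuel
  induction fuel with
  | zero => intro l cur acc h; omega
  | succ n ih =>
    intro l cur acc h
    cases l with
    | nil => simp [PySem.Chars.splitOn.go, pvSplitAux]
    | cons c rest =>
      rw [PySem.Chars.splitOn.go]
      by_cases hc : c = ' '
      · subst hc
        rw [if_pos (by simp [List.isPrefixOf])]
        rw [ih _ _ _ (by simpa using Nat.lt_of_succ_lt_succ h)]
        simp [pvSplitAux]
      · rw [if_neg (by simp [List.isPrefixOf]; exact fun hh => hc hh.symm)]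
        rw [ih _ _ _ (by simpa using Nat.lt_of_succ_lt_succ h)]
        simp [pvSplitAux, hc]

lemma pvSplitOn_eq (cs : List Char) : PySem.Chars.splitOn cs [' '] = pvSplitAux [] cs := by
  have := pvGo_eq (cs.length + 1) cs [] [] (by omega)
  simpa [PySem.Chars.splitOn] using this

lemma pvFilter_splitAux : ∀ (l cur : List Char),
    (pvSplitAux cur l).filter (fun w => !w.isEmpty) = pvWordsAux cur l := by
  intro l
  induction l with
  | nil =>
    intro cur
    simp [pvSplitAux, pvWordsAux, List.filter]
    cases cur <;> simp
  | cons c r ih =>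
    intro cur
    by_cases hc : c = ' '
    · subst hc
      simp only [pvSplitAux, pvWordsAux, if_pos rfl, List.filter_cons]
      cases cur <;> simp [ih]
    · simp only [pvSplitAux, pvWordsAux, if_neg hc, ih]

lemma pvWordsAux_ne_nil : ∀ (l cur : List Char), cur ≠ [] → pvWordsAux cur l ≠ [] := by
  intro l
  induction l with
  | nil => intro cur h; simp [pvWordsAux, h]
  | cons c r ih =>
    intro cur h
    by_cases hc : c = ' '
    · subst hc; simp [pvWordsAux, h]
    · simp only [pvWordsAux, if_neg hc]
      exact ih _ (by simp)

lemma pvWordsAux_nospace : ∀ (w cur l : List Char), (∀ c ∈ w, c ≠ ' ') →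
    pvWordsAux cur (w ++ l) = pvWordsAux (cur ++ w) l := by
  intro w
  induction w with
  | nil => intro cur l _; simp
  | cons c r ih =>
    intro cur l h
    have hc : c ≠ ' ' := h c (by simp)
    simp only [List.cons_append, pvWordsAux, if_neg hc]
    rw [ih _ _ (fun x hx => h x (by simp [hx]))]
    simp

lemma pvWordsAux_concat_space : ∀ (l cur : List Char),
    pvWordsAux cur (l ++ [' ']) = pvWordsAux cur l := by
  intro l
  induction l with
  | nil => intro cur; simp [pvWordsAux]
  | cons c r ih =>
    intro cur
    by_cases hc : c = ' '
    · subst hc; simp only [List.cons_append, pvWordsAux, ih]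
    · simp only [List.cons_append, pvWordsAux, if_neg hc, ih]

lemma pvWordsAux_space_suffix : ∀ (suf l cur : List Char), (∀ c ∈ suf, c = ' ') →
    pvWordsAux cur (l ++ suf) = pvWordsAux cur l := by
  intro suf
  induction suf with
  | nil => intro l cur _; simp
  | cons c r ih =>
    intro l cur h
    have hc : c = ' ' := h c (by simp)
    subst hc
    rw [show l ++ ' ' :: r = (l ++ [' ']) ++ r by simp]
    rw [ih _ _ (fun x hx => h x (by simp [hx]))]
    exact pvWordsAux_concat_space l cur

lemma pvWordsAux_space_prefix : ∀ (g l : List Char), (∀ c ∈ g, c = ' ') →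
    pvWordsAux [] (g ++ l) = pvWordsAux [] l := by
  intro g
  induction g with
  | nil => intro l _; simp
  | cons c r ih =>
    intro l h
    have hc : c = ' ' := h c (by simp)
    subst hc
    simp only [List.cons_append, pvWordsAux, if_pos rfl, List.isEmpty_nil, if_pos rfl]
    simpa using ih l (fun x hx => h x (by simp [hx]))

lemma pvWordsAux_trim (l : List Char) : pvWordsAux [] (pvTrim l) = pvWordsAux [] l := by
  unfold pvTrim
  have step1 : pvWordsAux [] ((l.dropWhile pvSp).rdropWhile pvSp)
      = pvWordsAux [] (l.dropWhile pvSp) := by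
    conv_rhs => rw [← List.rdropWhile_append_rtakeWhile (p := pvSp) (l := l.dropWhile pvSp)]
    rw [pvWordsAux_space_suffix _ _ _ (fun x hx => by
      have := List.mem_rtakeWhile_imp hx
      simpa [pvSp] using this)]
  have step2 : pvWordsAux [] (l.dropWhile pvSp) = pvWordsAux [] l := by
    conv_rhs => rw [← List.takeWhile_append_dropWhile (p := pvSp) (l := l)]
    rw [pvWordsAux_space_prefix _ _ (fun x hx => by
      have := List.mem_takeWhile_imp hx
      simpa [pvSp] using this)]
  rw [step1, step2]

lemma pvFoldl_word : ∀ (w acc : List Char), (∀ c ∈ w, c ≠ ' ') →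
    List.foldl pvCollapseF acc w = acc ++ w := by
  intro w
  induction w with
  | nil => intro acc _; simp
  | cons c r ih =>
    intro acc h
    have hc : c ≠ ' ' := h c (by simp)
    rw [List.foldl_cons, show pvCollapseF acc c = acc ++ [c] by simp [pvCollapseF, hc]]
    rw [ih _ (fun x hx => h x (by simp [hx]))]
    simp

lemma pvFoldl_space_last : ∀ (g acc : List Char), (∀ c ∈ g, c = ' ') →
    acc.getLast? = some ' ' → List.foldl pvCollapseF acc g = acc := by
  intro g
  induction g with
  | nil => intro acc _ _; simp
  | cons c r ih =>
    intro acc h hl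
    have hc : c = ' ' := h c (by simp)
    subst hc
    rw [List.foldl_cons, show pvCollapseF acc ' ' = acc by
      simp [pvCollapseF, pyGet_neg_one, hl]]
    exact ih _ (fun x hx => h x (by simp [hx])) hl

lemma pvFoldl_gap : ∀ (g acc : List Char), g ≠ [] → (∀ c ∈ g, c = ' ') →
    acc.getLast? ≠ some ' ' → List.foldl pvCollapseF acc g = acc ++ [' '] := by
  intro g acc hne h hl
  cases g with
  | nil => exact absurd rfl hne
  | cons c r =>
    have hc : c = ' ' := h c (by simp)
    subst hc
    rw [List.foldl_cons, show pvCollapseF acc ' ' = acc ++ [' '] by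
      simp [pvCollapseF, pyGet_neg_one, hl]]
    exact pvFoldl_space_last r _ (fun x hx => h x (by simp [hx])) (by simp)

lemma pvMain : ∀ (n : Nat) (t : List Char), t.length ≤ n →
    t.head? ≠ some ' ' → t.getLast? ≠ some ' ' → ∀ acc : List Char,
    List.foldl pvCollapseF acc t = acc ++ PySem.Chars.join [' '] (pvWordsAux [] t) := by
  intro n
  induction n with
  | zero =>
    intro t ht _ _ acc
    rw [Nat.le_zero, List.length_eq_zero_iff] at ht
    subst ht
    simp [pvWordsAux, PySem.Chars.join, List.intercalate]
  | succ n ih =>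
    intro t ht h1 h2 acc
    cases ht' : t with
    | nil => simp [pvWordsAux, PySem.Chars.join, List.intercalate]
    | cons c r =>
      subst ht'
      have hc : c ≠ ' ' := by intro hh; exact h1 (by simp [hh])
      set w := (c :: r).takeWhile pvNsp with hwdef
      set u := (c :: r).dropWhile pvNsp with hudef
      have htw : w ++ u = c :: r := List.takeWhile_append_dropWhile
      have hw : ∀ x ∈ w, x ≠ ' ' := by
        intro x hx
        have := List.mem_takeWhile_imp hx
        simpa [pvNsp] using this
      have hwne : w ≠ [] := by
        rw [hwdef, List.takeWhile_cons_of_pos (by simp [pvNsp, hc])]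
        simp
      have hlast_w : w.getLast? ≠ some ' ' := by
        rw [List.getLast?_eq_some_getLast (l := w) hwne]
        intro hh
        exact hw _ (List.getLast_mem hwne) (by simpa using hh)
      have hfold1 : ∀ a : List Char, List.foldl pvCollapseF a (c :: r)
          = List.foldl pvCollapseF (a ++ w) u := by
        intro a
        rw [← htw, List.foldl_append, pvFoldl_word w a hw]
      have hwords1 : pvWordsAux [] (c :: r) = pvWordsAux w u := by
        conv_lhs => rw [← htw]
        rw [pvWordsAux_nospace w [] u hw]
        simp
      cases hu' : u with
      | nil =>
        rw [hfold1, hwords1, hu']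
        simp [pvWordsAux, hwne, PySem.Chars.join, List.intercalate, List.isEmpty_iff]
      | cons d u2 =>
        have hd : d = ' ' := by
          have hnn : List.dropWhile pvNsp (c :: r) ≠ [] := by rw [← hudef, hu']; simp
          have hh := List.head_dropWhile_not pvNsp (l := c :: r) hnn
          have h9 : (List.dropWhile pvNsp (c :: r)).head? = some d := by
            rw [← hudef, hu']; simp
          rw [List.head?_eq_some_head hnn, Option.some.injEq] at h9
          rw [h9] at hh
          simpa [pvNsp] using hh
        subst hd
        set g := u.takeWhile pvSp with hgdef
        set v := u.dropWhile pvSp with hvdef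
        have htg : g ++ v = u := List.takeWhile_append_dropWhile
        have hg : ∀ x ∈ g, x = ' ' := by
          intro x hx
          have := List.mem_takeWhile_imp hx
          simpa [pvSp] using this
        have hgne : g ≠ [] := by
          rw [hgdef, hu', List.takeWhile_cons_of_pos (by simp [pvSp])]
          simp
        by_cases hv : v = []
        · exfalso
          apply h2
          have : (c :: r) = w ++ g := by rw [← htw]; rw [← htg, hv]; simp
          rw [this, List.getLast?_append_of_ne_nil _ hgne]
          rw [List.getLast?_eq_some_getLast (l := g) hgne]
          simp [hg _ (List.getLast_mem hgne)]
        · have hvh : v.head? ≠ some ' ' := by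
            have hnn : List.dropWhile pvSp u ≠ [] := by rw [← hvdef]; exact hv
            have hh := List.head_dropWhile_not pvSp (l := u) hnn
            have h9 : (List.dropWhile pvSp u).head? = some (v.head hv) := by
              rw [← hvdef]; exact List.head?_eq_some_head hv
            rw [List.head?_eq_some_head hnn, Option.some.injEq] at h9
            rw [h9] at hh
            rw [List.head?_eq_some_head hv]
            intro hcon
            simp only [Option.some.injEq] at hcon
            rw [hcon] at hh
            simp [pvSp] at hh
          have hvl : v.getLast? ≠ some ' ' := by
            have : (c :: r) = (w ++ g) ++ v := by rw [List.append_assoc, htg, htw]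
            rw [this, List.getLast?_append_of_ne_nil _ hv] at h2
            exact h2
          have hvlen : v.length ≤ n := by
            have h5 : u.length ≤ r.length := by
              rw [hudef, List.dropWhile_cons_of_pos (by simp [pvNsp, hc])]
              exact List.length_dropWhile_le pvNsp r
            have h6 : v.length ≤ u.length := by
              rw [hvdef]; exact List.length_dropWhile_le pvSp u
            simp at ht
            omega
          have hIH := ih v hvlen hvh hvl
          rw [hfold1, ← htg, List.foldl_append]
          rw [pvFoldl_gap g (acc ++ w) hgne hg
            (by rw [List.getLast?_append_of_ne_nil _ hwne]; exact hlast_w)]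
          rw [hIH]
          have hwords2 : pvWordsAux w u = w :: pvWordsAux [] v := by
            rw [hu']
            have hg2 : ∀ x ∈ u2.takeWhile pvSp, x = ' ' := by
              intro x hx
              have := List.mem_takeWhile_imp hx
              simpa [pvSp] using this
            have hsplit : u2 = u2.takeWhile pvSp ++ v := by
              have hveq : v = u2.dropWhile pvSp := by
                rw [hvdef, hu', List.dropWhile_cons_of_pos (by simp [pvSp])]
              rw [hveq, List.takeWhile_append_dropWhile]
            show pvWordsAux w (' ' :: u2) = _
            rw [show pvWordsAux w (' ' :: u2)
                = (if w.isEmpty then [] else [w]) ++ pvWordsAux [] u2 by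
              simp [pvWordsAux]]
            rw [if_neg (by simpa [List.isEmpty_iff] using hwne)]
            conv_lhs => rw [hsplit]
            rw [pvWordsAux_space_prefix _ _ hg2]
            simp
          rw [hwords1, hwords2]
          obtain ⟨q, qs, hqs⟩ : ∃ q qs, pvWordsAux [] v = q :: qs := by
            cases hv2 : v with
            | nil => exact absurd hv2 hv
            | cons e v2 =>
              have he : e ≠ ' ' := by
                intro hh
                exact hvh (by rw [hv2, hh]; simp)
              rw [pvWordsAux, if_neg he]
              have := pvWordsAux_ne_nil v2 ([] ++ [e]) (by simp)
              cases hq : pvWordsAux ([] ++ [e]) v2 with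
              | nil => exact absurd hq this
              | cons q qs => exact ⟨q, qs, by simpa using hq⟩
          rw [hqs, PySem.Chars.join_cons_cons]
          simp

-- ===== VERDICT (by name: the statement is the Claim_ definition above) =====
theorem trimSpace_spec : Claim_equal_trimSpace := by
  intro s _
  unfold Spec_trimSpace trimSpace trimSpace_alt
  dsimp only
  set cs := s.toList with hcs
  have h1 := pvLoop1_spec_aux cs (((cs.length : Int) - 1) + 1 - 0).toNat 0 ((cs.length : Int) - 1)
    le_rfl (by omega) (by omega)
  rw [pvLoop2_spec_aux cs ((pvLoop1 cs 0 ((cs.length : Int) - 1)).2 + 1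
      - (pvLoop1 cs 0 ((cs.length : Int) - 1)).1).toNat _ _ _ le_rfl h1.1 h1.2.1]
  rw [h1.2.2, pvSub_full cs]
  rw [pvMain (pvTrim cs).length (pvTrim cs) le_rfl (pvTrim_head cs) (pvTrim_last cs) []]
  rw [pvWordsAux_trim cs]
  rw [pvSplitOn_eq cs, pvFilter_splitAux]
  simp
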